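-- pv_equiv track=rewrite | github.com/cdclaxton/learning | Python/Algorithms/count_start_end/string_split_experiment.py | split
-- ===== SOURCE A (Python) =====
-- from typing import Any, Dict, List
--
-- def split(s: str) -> List[List[int]]:
--
--     result = []
--
--     batch = []
--
--     start = 0
--     end = 0
--
--     while end < len(s):
--         if s[end] == " ":
--             batch.append(int(s[start:end]))
--             start = end + 1
--
--         elif s[end] == "|":
--             batch.append(int(s[start:end]))
--             result.append(batch)
--             batch = []
--             start = end + 1
--
--         end += 1
--
--     if start != end:
--         batch.append(int(s[start:end]))
--
--     if len(batch) > 0: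
--         result.append(batch)
--
--     return result
-- ===== SOURCE B (Python) =====
-- from typing import List
--
--
-- def split(s: str) -> List[List[int]]:
--     if s == "":
--         return []
--     # a single trailing separator ends the last token/batch and adds nothing
--     if s[-1] in " |":
--         s = s[:-1]
--     return [[int(t) for t in g.split(" ")] for g in s.split("|")]
-- ===== Notes on version B (the rewrite author's own statement) =====
-- stated objective: idiomatic
-- what changed: Replaces the character-by-character index scan with start/end slice bookkeeping by the idiomatic two-level decomposition: split the string into batch groups on '|', then each group into tokens on ' ', converting each token with int().
import Mathlib
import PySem

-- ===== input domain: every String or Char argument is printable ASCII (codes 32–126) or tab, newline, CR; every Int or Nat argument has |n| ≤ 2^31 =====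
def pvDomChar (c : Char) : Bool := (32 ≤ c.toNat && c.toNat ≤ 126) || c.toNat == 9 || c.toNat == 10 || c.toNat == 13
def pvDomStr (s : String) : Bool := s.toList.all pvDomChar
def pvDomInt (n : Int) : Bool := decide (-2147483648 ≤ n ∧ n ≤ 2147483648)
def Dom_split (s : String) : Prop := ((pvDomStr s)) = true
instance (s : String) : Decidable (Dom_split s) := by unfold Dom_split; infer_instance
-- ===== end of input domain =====

-- B differs from A by decomposition only: split into '|'-groups then ' '-tokens, instead of an index scan.

-- ===== PORT A =====
-- int(t): Python raises ValueError where ofChars? is none; exactly those inputs are outside Pre_split,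
-- so the default 0 is never the value A's Python actually returns on an admitted input.
def pvInt (t : List Char) : Int := (PySem.Int.ofChars? t).getD 0

-- loop body of A's while loop; state = (result, batch, start), e is the current `end` (always < cs.length)
def pvStepA (cs : List Char) (acc : List (List Int) × List Int × Nat) (e : Nat) :
    List (List Int) × List Int × Nat :=
  let (result, batch, start) := acc
  let c := cs.getD e ' '       -- s[end], in range since e < len(s)
  if c = ' ' then
    (result, batch ++ [pvInt (PySem.List.slice cs (some (start : Int)) (some (e : Int)))], e + 1)
  else if c = '|' then
    (result ++ [batch ++ [pvInt (PySem.List.slice cs (some (start : Int)) (some (e : Int)))]], [], e + 1)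
  else
    (result, batch, start)

def split (s : String) : List (List Int) :=
  let cs := s.toList
  let n := cs.length
  -- while end < len(s): … ; end += 1   (end takes the values 0, 1, …, n-1)
  let st := (List.range n).foldl (pvStepA cs) ([], [], 0)
  let result := st.1
  let batch := st.2.1
  let start := st.2.2
  let batch :=
    if start ≠ n then batch ++ [pvInt (PySem.List.slice cs (some (start : Int)) (some (n : Int)))]
    else batch
  if batch.length > 0 then result ++ [batch] else result

-- ===== PORT B =====
def split_alt (s : String) : List (List Int) :=
  if s = "" then []
  else
    let cs := s.toList
    -- if s[-1] in " |": s = s[:-1]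
    let cs :=
      match PySem.List.pyGet? cs (-1) with
      | some c => if c = ' ' || c = '|' then PySem.List.slice cs none (some (-1)) else cs
      | none => cs   -- unreachable: s ≠ ""
    -- [[int(t) for t in g.split(" ")] for g in s.split("|")]  (sep ≠ "", so .split never raises)
    (PySem.Chars.splitOn cs ['|']).map (fun g => (PySem.Chars.splitOn g [' ']).map pvInt)

-- ===== PRECONDITION & SPEC =====
-- Pre_split holds exactly where Python A returns: every token cut by a space or pipe separator must
-- parse with int() (the final token may instead be empty: a trailing separator leaves nothing to convert).
def Pre_split (s : String) : Prop :=
  let toks := s.toList.splitOnP (fun c => c = ' ' || c = '|')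
  (∀ t ∈ toks.dropLast, (PySem.Int.ofChars? t).isSome = true) ∧
  (∀ t ∈ toks.getLast?.toList, t = [] ∨ (PySem.Int.ofChars? t).isSome = true)
instance (s : String) : Decidable (Pre_split s) := by unfold Pre_split; infer_instance

def pvWitness_split : String := "12 7|8 -3|+4"

def Spec_split (s : String) (out : List (List Int)) : Prop := out = split_alt s
instance (s : String) (out : List (List Int)) : Decidable (Spec_split s out) := by unfold Spec_split; infer_instance

-- ===== CLAIM (what is proved, stated in full; the proofs are below) =====
def Claim_equal_split : Prop := ∀ (s : String), Dom_split s → Pre_split s → Spec_split s (split s)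

-- ===== LEMMAS AND PROOFS =====

-- merge a prefix into the first piece (the non-empty-list modifier used by the split characterisation)
def pvMod (p : List Char) : List (List Char) → List (List Char)
  | [] => [p]
  | g :: gs => (p ++ g) :: gs

-- structural split of a char list on one separator (Python's l.split(a) shape)
def pvSplitCh (a : Char) : List Char → List (List Char)
  | [] => [[]]
  | c :: l => if c = a then [] :: pvSplitCh a l else pvMod [c] (pvSplitCh a l)

theorem pvSplitCh_ne_nil (a : Char) (l : List Char) : pvSplitCh a l ≠ [] := by
  cases l with
  | nil => simp [pvSplitCh]
  | cons c l =>
      simp only [pvSplitCh]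
      split
      · simp
      · cases h : pvSplitCh a l <;> simp [pvMod]

-- char-list version of A's scan: cur is the pending token (= s[start:end])
def pvScan : List Char → List Char → List (List Int) → List Int →
    List (List Int) × List Int × List Char
  | [], cur, r, b => (r, b, cur)
  | c :: l, cur, r, b =>
    if c = ' ' then pvScan l [] r (b ++ [pvInt cur])
    else if c = '|' then pvScan l [] (r ++ [b ++ [pvInt cur]]) []
    else pvScan l (cur ++ [c]) r b

def pvFinish (p : List (List Int) × List Int × List Char) : List (List Int) :=
  let b' := if p.2.2 ≠ [] then p.2.1 ++ [pvInt p.2.2] else p.2.1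
  if b' ≠ [] then p.1 ++ [b'] else p.1

-- token groups of a char list: first cut on '|', then each piece on ' '
def pvGroups (l : List Char) : List (List (List Char)) :=
  (pvSplitCh '|' l).map (pvSplitCh ' ')

def pvAsm (b : List Int) : List (List (List Char)) → List (List Int) × List Int × List Char
  | [] => ([], b, [])
  | [g] => ([], b ++ g.dropLast.map pvInt, g.getLastD [])
  | g :: g' :: rest =>
      let p := pvAsm [] (g' :: rest)
      ((b ++ g.map pvInt) :: p.1, p.2)

def pvMergeT (cur : List Char) : List (List (List Char)) → List (List (List Char))
  | [] => [[cur]]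
  | g :: rest => pvMod cur g :: rest


theorem pvGo_single (a : Char) : ∀ (fuel : Nat) (l cur : List Char) (accs : List (List Char)),
    l.length < fuel →
    PySem.Chars.splitOn.go [a] fuel l cur accs = accs.reverse ++ pvMod cur.reverse (pvSplitCh a l) := by
  intro fuel
  induction fuel with
  | zero => intro l cur accs h; omega
  | succ f ih =>
      intro l cur accs h
      cases l with
      | nil =>
          simp [PySem.Chars.splitOn.go, pvSplitCh, pvMod]
      | cons c rest =>
          rw [PySem.Chars.splitOn.go]
          by_cases hc : c = a
          · subst hc
            have hpre : List.isPrefixOf [c] (c :: rest) = true := by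
              simp [List.isPrefixOf]
            simp only [hpre, if_pos, List.length_cons, List.length_nil, List.drop_succ_cons, List.drop_zero]
            rw [ih rest [] (cur.reverse :: accs) (by simpa using Nat.lt_of_succ_lt_succ h)]
            cases hsp : pvSplitCh c rest with
            | nil => exact absurd hsp (pvSplitCh_ne_nil c rest)
            | cons g gs => simp [pvSplitCh, pvMod, hsp]
          · have hpre : List.isPrefixOf [a] (c :: rest) = false := by
              simp [List.isPrefixOf, BEq.beq]
              intro hh; exact absurd hh.symm hc
            simp only [hpre]
            rw [if_neg (by simp)]
            rw [ih rest (c :: cur) accs (by simpa using Nat.lt_of_succ_lt_succ h)]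
            simp only [pvSplitCh, if_neg hc]
            cases hsp : pvSplitCh a rest with
            | nil => exact absurd hsp (pvSplitCh_ne_nil a rest)
            | cons g gs => simp [pvMod]

theorem pvSplitOn_single (a : Char) (l : List Char) :
    PySem.Chars.splitOn l [a] = pvSplitCh a l := by
  rw [PySem.Chars.splitOn]
  rw [pvGo_single a (l.length + 1) l [] [] (by omega)]
  cases hsp : pvSplitCh a l with
  | nil => exact absurd hsp (pvSplitCh_ne_nil a l)
  | cons g gs => simp [pvMod]

theorem pvFold_scan (cs : List Char) : ∀ (k i st : Nat) (r : List (List Int)) (b : List Int),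
    st ≤ i → i + k = cs.length →
    ∃ st', (List.range' i k).foldl (pvStepA cs) (r, b, st) =
        ((pvScan ((cs.drop i).take k) ((cs.drop st).take (i - st)) r b).1,
         (pvScan ((cs.drop i).take k) ((cs.drop st).take (i - st)) r b).2.1, st') ∧
        st' ≤ cs.length ∧
        cs.drop st' = (pvScan ((cs.drop i).take k) ((cs.drop st).take (i - st)) r b).2.2 := by
  intro k
  induction k with
  | zero =>
      intro i st r b hst hik
      have hi : i = cs.length := by omega
      subst hi
      refine ⟨st, by simp [pvScan], by omega, ?_⟩
      simp only [List.take_zero, pvScan]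
      exact (List.take_of_length_le (by rw [List.length_drop])).symm
  | succ k ih =>
      intro i st r b hst hik
      have hi : i < cs.length := by omega
      have hdrop : cs.drop i = cs[i] :: cs.drop (i + 1) := List.drop_eq_getElem_cons hi
      have htake : (cs.drop i).take (k + 1) = cs[i] :: (cs.drop (i + 1)).take k := by
        rw [hdrop]; rfl
      rw [List.range'_succ, List.foldl_cons, htake]
      have hget : cs[i]? = some cs[i] := List.getElem?_eq_getElem hi
      have hslice : PySem.List.slice cs (some (st : Int)) (some (i : Int)) = (cs.drop st).take (i - st) :=
        PySem.List.slice_natCast cs st i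
      by_cases hsp : cs[i] = ' '
      · have := ih (i + 1) (i + 1) (r) (b ++ [pvInt ((cs.drop st).take (i - st))]) (le_refl _) (by omega)
        simp only [Nat.sub_self, List.take_zero] at this
        obtain ⟨st', heq, h1, h2⟩ := this
        refine ⟨st', ?_, h1, ?_⟩
        · rw [show pvStepA cs (r, b, st) i = (r, b ++ [pvInt ((cs.drop st).take (i - st))], i + 1) by
            simp [pvStepA, List.getD, hget, hsp, hslice]]
          rw [heq]
          simp [pvScan, hsp]
        · rw [h2]; simp [pvScan, hsp]
      · by_cases hbar : cs[i] = '|'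
        · have := ih (i + 1) (i + 1) (r ++ [b ++ [pvInt ((cs.drop st).take (i - st))]]) [] (le_refl _) (by omega)
          simp only [Nat.sub_self, List.take_zero] at this
          obtain ⟨st', heq, h1, h2⟩ := this
          refine ⟨st', ?_, h1, ?_⟩
          · rw [show pvStepA cs (r, b, st) i = (r ++ [b ++ [pvInt ((cs.drop st).take (i - st))]], [], i + 1) by
              simp [pvStepA, List.getD, hget, hbar, hslice]]
            rw [heq]
            simp [pvScan, hbar]
          · rw [h2]; simp [pvScan, hbar]
        · have hcur : (cs.drop st).take (i + 1 - st) = (cs.drop st).take (i - st) ++ [cs[i]] := by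
            have h1 : i + 1 - st = (i - st) + 1 := by omega
            rw [h1, List.take_add_one]
            have : (cs.drop st)[i - st]? = some cs[i] := by
              rw [List.getElem?_drop]
              rw [List.getElem?_eq_getElem (by omega)]
              congr 1
              congr 1
              omega
            simp [this]
          have := ih (i + 1) st r b (by omega) (by omega)
          obtain ⟨st', heq, h1, h2⟩ := this
          refine ⟨st', ?_, h1, ?_⟩
          · rw [show pvStepA cs (r, b, st) i = (r, b, st) by
              simp [pvStepA, List.getD, hget, hsp, hbar]]
            rw [heq, hcur]
            simp [pvScan, hsp, hbar]
          · rw [h2, hcur]; simp [pvScan, hsp, hbar]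

theorem pvSplit_eq_scan (s : String) :
    split s = pvFinish (pvScan s.toList [] [] []) := by
  obtain ⟨st', heq, h1, h2⟩ := pvFold_scan s.toList s.toList.length 0 0 [] [] (le_refl 0) (by omega)
  simp only [List.drop_zero, List.take_length, List.take_zero, Nat.sub_zero] at heq h2
  have hr : List.range s.toList.length = List.range' 0 s.toList.length := List.range_eq_range' ..
  have hslice : PySem.List.slice s.toList (some (st' : Int)) (some (s.toList.length : Int))
      = (pvScan s.toList [] [] []).2.2 := by
    rw [PySem.List.slice_natCast, ← h2]
    exact List.take_of_length_le (by rw [List.length_drop])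
  simp only [split, hr, heq, pvFinish, hslice]
  have hlen : s.length = s.toList.length := rfl
  by_cases hc : st' = s.toList.length
  · have hcur : (pvScan s.toList [] [] []).2.2 = [] := by
      rw [← h2, hc, List.drop_length]
    have hc' : st' = s.length := by rw [hlen]; exact hc
    simp [hc', hcur, List.length_pos_iff]
  · have hcur : (pvScan s.toList [] [] []).2.2 ≠ [] := by
      rw [← h2]
      simp only [ne_eq, List.drop_eq_nil_iff]
      omega
    have hc' : ¬ st' = s.length := by rw [hlen]; exact hc
    simp [hc', hcur]

theorem pvAsm_cons (b : List Int) (t : List Char) (g : List (List Char))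
    (rest : List (List (List Char))) (hg : g ≠ []) :
    pvAsm b ((t :: g) :: rest) = pvAsm (b ++ [pvInt t]) (g :: rest) := by
  cases rest with
  | nil =>
      obtain ⟨g0, gs0, rfl⟩ : ∃ g0 gs0, g = g0 :: gs0 := by
        cases g with | nil => exact absurd rfl hg | cons a b => exact ⟨a, b, rfl⟩
      simp [pvAsm]
  | cons g' rest' => simp [pvAsm]

theorem pvScan_spec : ∀ (l cur : List Char) (r : List (List Int)) (b : List Int),
    pvScan l cur r b =
      ((r ++ (pvAsm b (pvMergeT cur (pvGroups l))).1), (pvAsm b (pvMergeT cur (pvGroups l))).2) := by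
  intro l
  induction l with
  | nil =>
      intro cur r b
      simp [pvScan, pvGroups, pvSplitCh, pvMergeT, pvMod, pvAsm]
  | cons c l ih =>
      intro cur r b
      obtain ⟨s0, ss, hsp⟩ : ∃ s0 ss, pvSplitCh '|' l = s0 :: ss := by
        cases h : pvSplitCh '|' l with
        | nil => exact absurd h (pvSplitCh_ne_nil _ _)
        | cons a b => exact ⟨a, b, rfl⟩
      obtain ⟨t0, ts, hts⟩ : ∃ t0 ts, pvSplitCh ' ' s0 = t0 :: ts := by
        cases h : pvSplitCh ' ' s0 with
        | nil => exact absurd h (pvSplitCh_ne_nil _ _)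
        | cons a b => exact ⟨a, b, rfl⟩
      by_cases hsp' : c = ' '
      · subst hsp'
        rw [show pvScan (' ' :: l) cur r b = pvScan l [] r (b ++ [pvInt cur]) from rfl]
        rw [ih [] r (b ++ [pvInt cur])]
        have hgl : pvGroups (' ' :: l) = ([] :: t0 :: ts) :: (ss.map (pvSplitCh ' ')) := by
          simp [pvGroups, pvSplitCh, hsp, pvMod, hts]
        have hgl' : pvGroups l = (t0 :: ts) :: (ss.map (pvSplitCh ' ')) := by
          simp [pvGroups, hsp, hts]
        rw [hgl, hgl']
        simp only [pvMergeT, pvMod, List.append_nil]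
        rw [pvAsm_cons b cur (t0 :: ts) _ (by simp)]
        simp
      · by_cases hbar : c = '|'
        · subst hbar
          rw [show pvScan ('|' :: l) cur r b = pvScan l [] (r ++ [b ++ [pvInt cur]]) [] by
            simp [pvScan, hsp']]
          rw [ih [] (r ++ [b ++ [pvInt cur]]) []]
          have hgl : pvGroups ('|' :: l) = [[]] :: ((t0 :: ts) :: (ss.map (pvSplitCh ' '))) := by
            simp [pvGroups, pvSplitCh, hsp, hts]
          have hgl' : pvGroups l = (t0 :: ts) :: (ss.map (pvSplitCh ' ')) := by
            simp [pvGroups, hsp, hts]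
          rw [hgl, hgl']
          simp [pvMergeT, pvMod, pvAsm]
        · rw [show pvScan (c :: l) cur r b = pvScan l (cur ++ [c]) r b by
            rw [pvScan]; rw [if_neg hsp', if_neg hbar]]
          rw [ih (cur ++ [c]) r b]
          have hgl : pvGroups (c :: l) = ((c :: t0) :: ts) :: (ss.map (pvSplitCh ' ')) := by
            simp [pvGroups, pvSplitCh, hsp, pvMod, hts, hbar, hsp']
          have hgl' : pvGroups l = (t0 :: ts) :: (ss.map (pvSplitCh ' ')) := by
            simp [pvGroups, hsp, hts]
          rw [hgl, hgl']
          simp [pvMergeT, pvMod]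

theorem pvSplitCh_concat_sep (a : Char) (l : List Char) :
    pvSplitCh a (l ++ [a]) = pvSplitCh a l ++ [[]] := by
  induction l with
  | nil => simp [pvSplitCh]
  | cons c l ih =>
      by_cases hc : c = a
      · subst hc; simp [pvSplitCh, ih]
      · simp only [List.cons_append, pvSplitCh, if_neg hc, ih]
        cases h : pvSplitCh a l with
        | nil => exact absurd h (pvSplitCh_ne_nil _ _)
        | cons g gs => simp [pvMod]

theorem pvSplitCh_concat_ne (a c : Char) (l : List Char) (hc : c ≠ a) :
    pvSplitCh a (l ++ [c]) =
      (pvSplitCh a l).dropLast ++ [(pvSplitCh a l).getLastD [] ++ [c]] := by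
  induction l with
  | nil => simp [pvSplitCh, pvMod, if_neg hc]
  | cons c' l ih =>
      by_cases hc' : c' = a
      · subst hc'
        simp only [List.cons_append, pvSplitCh, ih]
        cases h : pvSplitCh c' l with
        | nil => exact absurd h (pvSplitCh_ne_nil _ _)
        | cons g gs => simp
      · simp only [List.cons_append, pvSplitCh, if_neg hc', ih]
        cases h : pvSplitCh a l with
        | nil => exact absurd h (pvSplitCh_ne_nil _ _)
        | cons g gs =>
            cases gs with
            | nil => simp [pvMod]
            | cons g' gs' => simp [pvMod]

theorem pvGetLastD_map {α β : Type} (f : α → β) (l : List α) (d : α) (hd : β) (h : l ≠ []) :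
    (l.map f).getLastD hd = f (l.getLastD d) := by
  induction l with
  | nil => exact absurd rfl h
  | cons x l ih =>
      cases l with
      | nil => simp
      | cons y l => simpa [List.getLastD_cons] using ih (by simp)

def pvModI (b : List Int) : List (List Int) → List (List Int)
  | [] => []
  | g :: gs => (b ++ g) :: gs

theorem pvAsm_concat : ∀ (gs : List (List (List Char))) (g : List (List Char)) (b : List Int),
    pvAsm b (gs ++ [g]) =
      (pvModI b (gs.map (List.map pvInt)),
       (if gs = [] then b else []) ++ g.dropLast.map pvInt, g.getLastD []) := by
  intro gs
  induction gs with
  | nil => intro g b; simp [pvAsm, pvModI]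
  | cons g0 gs' ih =>
      intro g b
      cases hgs : gs' ++ [g] with
      | nil => simp at hgs
      | cons x xs =>
          simp only [List.cons_append, hgs, pvAsm]
          rw [← hgs, ih g []]
          cases gs' with
          | nil => simp [pvModI]
          | cons y ys => simp [pvModI]

theorem pvGroups_concat_bar (l : List Char) :
    pvGroups (l ++ ['|']) = pvGroups l ++ [[[]]] := by
  unfold pvGroups
  rw [pvSplitCh_concat_sep]
  simp [pvSplitCh]

theorem pvGroups_concat_sp (l : List Char) :
    pvGroups (l ++ [' ']) =
      (pvGroups l).dropLast ++ [(pvGroups l).getLastD [] ++ [[]]] := by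
  unfold pvGroups
  rw [pvSplitCh_concat_ne '|' ' ' l (by decide)]
  rw [List.map_append, List.map_dropLast]
  congr 1
  rw [List.map_singleton, pvSplitCh_concat_sep]
  congr 2
  exact (pvGetLastD_map (pvSplitCh ' ') _ [] [] (pvSplitCh_ne_nil _ _)).symm

theorem pvGroups_concat_other (l : List Char) (c : Char) (h1 : c ≠ ' ') (h2 : c ≠ '|') :
    pvGroups (l ++ [c]) =
      (pvGroups l).dropLast ++
        [((pvGroups l).getLastD []).dropLast ++ [((pvGroups l).getLastD []).getLastD [] ++ [c]]] := by
  unfold pvGroups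
  rw [pvSplitCh_concat_ne '|' c l h2]
  rw [List.map_append, List.map_dropLast]
  congr 1
  rw [List.map_singleton, pvSplitCh_concat_ne ' ' c _ h1]
  rw [pvGetLastD_map (pvSplitCh ' ') _ [] [] (pvSplitCh_ne_nil _ _)]


theorem pvModI_nil (l : List (List Int)) : pvModI [] l = l := by
  cases l <;> simp [pvModI]

theorem pvMergeT_nil_groups (l : List Char) : pvMergeT [] (pvGroups l) = pvGroups l := by
  unfold pvGroups
  cases h : pvSplitCh '|' l with
  | nil => exact absurd h (pvSplitCh_ne_nil _ _)
  | cons s0 ss =>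
      simp only [List.map_cons, pvMergeT]
      cases h2 : pvSplitCh ' ' s0 with
      | nil => exact absurd h2 (pvSplitCh_ne_nil _ _)
      | cons t0 ts => simp [pvMod]

theorem pvGroups_getLastD_ne_nil (l : List Char) : (pvGroups l).getLastD [] ≠ [] := by
  unfold pvGroups
  rw [pvGetLastD_map (pvSplitCh ' ') _ [] [] (pvSplitCh_ne_nil _ _)]
  exact pvSplitCh_ne_nil _ _

theorem pvMapLastD {α β : Type} (f : α → β) (d : α) :
    ∀ G : List α, G ≠ [] → G.map f = G.dropLast.map f ++ [f (G.getLastD d)] := by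
  intro G
  induction G with
  | nil => intro h; exact absurd rfl h
  | cons x G ih =>
      intro _
      cases G with
      | nil => simp
      | cons y G => simpa [List.getLastD_cons] using ih (by simp)

theorem pvAltMap (u : List Char) :
    (PySem.Chars.splitOn u ['|']).map (fun g => (PySem.Chars.splitOn g [' ']).map pvInt) =
      (pvGroups u).map (List.map pvInt) := by
  simp only [pvSplitOn_single, pvGroups, List.map_map]
  rfl

theorem split_eq_alt (s : String) : split s = split_alt s := by
  rw [pvSplit_eq_scan, pvScan_spec]
  by_cases hnil : s.toList = []
  · have hs : s = "" := by
      have h2 := congrArg String.ofList hnil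
      simpa using h2
    subst hs
    simp [pvGroups, pvSplitCh, pvMergeT, pvMod, pvAsm, pvFinish, split_alt]
  · have hse : ¬ s = "" := fun h => hnil (by simp [h])
    obtain ⟨cs', c, hc⟩ := (List.eq_nil_or_concat s.toList).resolve_left hnil
    rw [List.concat_eq_append] at hc
    have hlast : PySem.List.pyGet? s.toList (-1) = some c := by
      rw [PySem.List.pyGet?_neg_one, hc, List.getLast?_concat]
    have hdrop : PySem.List.slice s.toList none (some (-1)) = cs' := by
      rw [PySem.List.slice_to_neg_one, hc, List.dropLast_concat]
    rw [pvMergeT_nil_groups]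
    simp only [split_alt, if_neg hse, hlast]
    by_cases hbar : c = '|'
    · subst hbar
      rw [if_pos (by decide), hdrop]
      rw [hc, pvGroups_concat_bar, pvAsm_concat]
      simp [pvModI_nil, pvFinish, pvAltMap]
    · by_cases hsp : c = ' '
      · subst hsp
        rw [if_pos (by decide), hdrop]
        rw [hc, pvGroups_concat_sp, pvAsm_concat]
        simp only [List.dropLast_concat, List.getLastD_concat, ite_self, pvModI_nil,
          pvFinish, List.nil_append]
        have hT : ¬ (pvGroups cs').getLast?.getD [] = [] := by
          rw [← List.getLastD_eq_getLast?]
          exact pvGroups_getLastD_ne_nil cs'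
        rw [pvAltMap]
        rw [pvMapLastD (List.map pvInt) [] (pvGroups cs') (by unfold pvGroups; simp [pvSplitCh_ne_nil])]
        simp [hT]
      · rw [if_neg (by simp [hsp, hbar])]
        rw [hc, pvGroups_concat_other cs' c hsp hbar, pvAsm_concat]
        simp only [List.dropLast_concat, List.getLastD_concat, ite_self, pvModI_nil,
          pvFinish, List.nil_append]
        rw [pvAltMap, ← hc]
        rw [hc, pvGroups_concat_other cs' c hsp hbar]
        simp [List.map_append]

-- ===== VERDICT (by name: the statement is the Claim_ definition above) =====
theorem split_spec : Claim_equal_split := by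
  intro s _ _
  unfold Spec_split
  exact split_eq_alt s
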